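-- pv_equiv track=rewrite | github.com/AdamZhouSE/pythonHomework | Code/CodeRecords/2444/60737/253436.py | contain_d
-- ===== SOURCE A (Python) =====
-- def contain_d(nums, k, t):
--     if k < 0 or t < 0:
--         return 'false'
--     Bucket = {}
--     Bucket_size = t + 1
--     for i in range(len(nums)):
--         bucket_number = nums[i] // Bucket_size
--         if bucket_number in Bucket:
--             return 'true'
--         Bucket[bucket_number] = nums[i]
--         if bucket_number - 1 in Bucket and nums[i] - Bucket[bucket_number - 1] <= t:
--             return 'true'
--         if bucket_number + 1 in Bucket and Bucket[bucket_number + 1] - nums[i] <= t: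
--             return 'true'
--         if i >= k:
--             Bucket.pop(nums[i-k] // Bucket_size)
--     return 'false'
-- ===== SOURCE B (Python) =====
-- def contain_d(nums, k, t):
--     # Brute-force scan: for each j, compare with the up-to-k previous elements.
--     n = len(nums)
--     for j in range(1, n):
--         for i in range(max(0, j - k), j):
--             if abs(nums[i] - nums[j]) <= t:
--                 return 'true'
--     return 'false'
-- ===== Notes on version B (the rewrite author's own statement) =====
-- stated objective: simpler
-- what changed: Replaced A's bucket-hashing dict (one bucket of width t+1 per key, neighbour-bucket checks, window eviction) by a plain brute-force scan comparing each element with its up-to-k predecessors; no guard or dict is needed, the k<0/t<0 cases fall out of the scan itself.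
import Mathlib
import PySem

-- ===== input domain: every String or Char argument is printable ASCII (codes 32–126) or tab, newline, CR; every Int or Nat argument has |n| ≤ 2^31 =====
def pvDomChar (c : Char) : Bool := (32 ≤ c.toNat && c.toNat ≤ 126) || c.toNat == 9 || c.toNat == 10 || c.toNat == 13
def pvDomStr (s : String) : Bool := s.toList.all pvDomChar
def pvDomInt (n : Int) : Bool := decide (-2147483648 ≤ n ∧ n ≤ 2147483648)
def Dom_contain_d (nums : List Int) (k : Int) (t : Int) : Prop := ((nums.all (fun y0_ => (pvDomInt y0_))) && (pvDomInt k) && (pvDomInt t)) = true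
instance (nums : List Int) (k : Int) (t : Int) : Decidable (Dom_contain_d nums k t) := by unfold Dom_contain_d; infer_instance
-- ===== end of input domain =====

-- B replaces A's bucket-hashing scheme by a plain brute-force window scan (simpler, no dict); equal return value proved on all inputs.


-- ===== PORT A =====
-- the for-loop over range(len(nums)) with early returns, carrying the Bucket dict.
-- Python's Bucket.pop raises KeyError on a missing key; that pop is only reached when the
-- key is present (proved by the window invariant below), so Dict.erase is exact here.
def contain_d_loopA (nums : List Int) (k t s : Int) (d : PySem.Dict Int Int) (i : Nat) : String :=
  if h : i < nums.length then
    let x := nums.getD i 0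
    let b := PySem.Int.floordiv x s
    if d.contains b then "true"
    else
      let d1 := d.insert b x
      if d1.contains (b - 1) && decide (x - d1.getD (b - 1) 0 ≤ t) then "true"
      else if d1.contains (b + 1) && decide (d1.getD (b + 1) 0 - x ≤ t) then "true"
      else
        let d2 := if k ≤ (i : Int) then d1.erase (PySem.Int.floordiv (nums.getD (i - k.toNat) 0) s) else d1
        contain_d_loopA nums k t s d2 (i + 1)
  else "false"
termination_by nums.length - i

def contain_d (nums : List Int) (k : Int) (t : Int) : String :=
  if k < 0 ∨ t < 0 then "false"
  else contain_d_loopA nums k t (t + 1) PySem.Dict.empty 0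

-- ===== PORT B =====
-- brute force: for each j, compare with the up-to-k previous elements (Source B).
def contain_d_alt (nums : List Int) (k : Int) (t : Int) : String :=
  if (PySem.List.pyRange 1 (nums.length : Int)).any (fun j =>
       (PySem.List.pyRange (max 0 (j - k)) j).any (fun i =>
         decide (|nums.getD i.toNat 0 - nums.getD j.toNat 0| ≤ t)))
  then "true" else "false"

-- ===== PRECONDITION & SPEC =====
def Spec_contain_d (nums : List Int) (k : Int) (t : Int) (out : String) : Prop := out = contain_d_alt nums k t
instance (nums : List Int) (k : Int) (t : Int) (out : String) : Decidable (Spec_contain_d nums k t out) := by unfold Spec_contain_d; infer_instance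

-- ===== CLAIM (what is proved, stated in full; the proofs are below) =====
def Claim_equal_contain_d : Prop := ∀ (nums : List Int) (k : Int) (t : Int), Dom_contain_d nums k t → Spec_contain_d nums k t (contain_d nums k t)

-- ===== LEMMAS AND PROOFS =====

-- the common specification: some pair at distance ≤ k with values within t
def pvFound (nums : List Int) (k t : Int) : Prop :=
  ∃ i j : Nat, i < j ∧ j < nums.length ∧ (j : Int) - (i : Int) ≤ k ∧ |nums.getD i 0 - nums.getD j 0| ≤ t

-- |a-b| ≤ t in terms of the buckets a//(t+1), b//(t+1)
theorem pv_close_iff (t a b : Int) (ht : 0 ≤ t) :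
    |a - b| ≤ t ↔ (PySem.Int.floordiv a (t+1) = PySem.Int.floordiv b (t+1)
      ∨ (PySem.Int.floordiv a (t+1) = PySem.Int.floordiv b (t+1) + 1 ∧ a - b ≤ t)
      ∨ (PySem.Int.floordiv b (t+1) = PySem.Int.floordiv a (t+1) + 1 ∧ b - a ≤ t)) := by
  have hs : (0:Int) < t + 1 := by omega
  set qa := PySem.Int.floordiv a (t+1) with hqa
  set qb := PySem.Int.floordiv b (t+1) with hqb
  have ha1 : qa * (t+1) ≤ a := (PySem.Int.le_floordiv_iff_mul_le hs).1 le_rfl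
  have ha2 : a < (qa + 1) * (t+1) := (PySem.Int.floordiv_lt_iff_lt_mul hs).1 (lt_add_one qa)
  have hb1 : qb * (t+1) ≤ b := (PySem.Int.le_floordiv_iff_mul_le hs).1 le_rfl
  have hb2 : b < (qb + 1) * (t+1) := (PySem.Int.floordiv_lt_iff_lt_mul hs).1 (lt_add_one qb)
  rw [abs_le]
  constructor
  · rintro ⟨h1, h2⟩
    have hcase : qa = qb ∨ qa = qb + 1 ∨ qb = qa + 1 ∨ qb + 2 ≤ qa ∨ qa + 2 ≤ qb := by omega
    rcases hcase with h | h | h | h | h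
    · exact Or.inl h
    · exact Or.inr (Or.inl ⟨h, h2⟩)
    · exact Or.inr (Or.inr ⟨h, by omega⟩)
    · exfalso
      have := mul_le_mul_of_nonneg_right (show qb + 2 ≤ qa by omega) hs.le
      nlinarith
    · exfalso
      have := mul_le_mul_of_nonneg_right (show qa + 2 ≤ qb by omega) hs.le
      nlinarith
  · rintro (h | ⟨h, h2⟩ | ⟨h, h2⟩)
    · constructor <;> nlinarith
    · constructor
      · nlinarith
      · exact h2
    · constructor
      · omega
      · nlinarith

-- PySem.Dict has no erase lemmas in the book, so these are proved here on the items list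
theorem pv_find_filter_ne (l : List (Int × Int)) (k k' : Int) (h : k' ≠ k) :
    List.find? (fun p => p.1 == k') (List.filter (fun p => !(p.1 == k)) l) =
      List.find? (fun p => p.1 == k') l := by
  induction l with
  | nil => rfl
  | cons p l ih =>
    by_cases hp : p.1 = k
    · have h1 : (!(p.1 == k)) = false := by simp [hp]
      have h2 : (p.1 == k') = false := by simp [hp]; exact Ne.symm h
      rw [List.filter_cons, h1, if_neg (by decide), List.find?_cons, h2, ih]
    · have h1 : (!(p.1 == k)) = true := by simp [hp]
      rw [List.filter_cons, h1, if_pos rfl, List.find?_cons, List.find?_cons]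
      cases h2 : (p.1 == k')
      · rw [ih]
      · rfl

theorem pv_get?_erase_of_ne (d : PySem.Dict Int Int) (k k' : Int) (h : k' ≠ k) :
    (d.erase k).get? k' = d.get? k' := by
  show Option.map _ (List.find? _ (List.filter _ d.items)) = Option.map _ (List.find? _ d.items)
  rw [pv_find_filter_ne d.items k k' h]

theorem pv_find_filter_self (l : List (Int × Int)) (k : Int) :
    List.find? (fun p => p.1 == k) (List.filter (fun p => !(p.1 == k)) l) = none := by
  induction l with
  | nil => rfl
  | cons p l ih =>
    by_cases hp : p.1 = k
    · have h1 : (!(p.1 == k)) = false := by simp [hp]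
      rw [List.filter_cons, h1, if_neg (by decide), ih]
    · have h1 : (!(p.1 == k)) = true := by simp [hp]
      have h2 : (p.1 == k) = false := by simp [hp]
      rw [List.filter_cons, h1, if_pos rfl, List.find?_cons, h2, ih]

theorem pv_get?_erase_self (d : PySem.Dict Int Int) (k : Int) :
    (d.erase k).get? k = none := by
  show Option.map _ (List.find? _ (List.filter _ d.items)) = none
  rw [pv_find_filter_self d.items k]
  rfl

-- ===== B characterisation =====
theorem pv_alt_true (nums : List Int) (k t : Int) (h : pvFound nums k t) :
    contain_d_alt nums k t = "true" := by
  unfold contain_d_alt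
  obtain ⟨i, j, hij, hjn, hk, ht⟩ := h
  rw [if_pos]
  rw [List.any_eq_true]
  refine ⟨(j : Int), ?_, ?_⟩
  · rw [PySem.List.mem_pyRange_one]; omega
  · rw [List.any_eq_true]
    refine ⟨(i : Int), ?_, ?_⟩
    · rw [PySem.List.mem_pyRange_one]; omega
    · simpa using ht

theorem pv_alt_false (nums : List Int) (k t : Int) (h : ¬ pvFound nums k t) :
    contain_d_alt nums k t = "false" := by
  unfold contain_d_alt
  rw [if_neg]
  intro hany
  rw [List.any_eq_true] at hany
  obtain ⟨j, hjm, hin⟩ := hany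
  rw [PySem.List.mem_pyRange_one] at hjm
  rw [List.any_eq_true] at hin
  obtain ⟨i, him, hval⟩ := hin
  rw [PySem.List.mem_pyRange_one] at him
  rw [decide_eq_true_eq] at hval
  exact h ⟨i.toNat, j.toNat, by omega, by omega, by omega, hval⟩

-- ===== A loop: invariant and characterisation =====
theorem pv_loopA_iff (nums : List Int) (k t : Int) (hk : 0 ≤ k) (ht : 0 ≤ t) :
    ∀ (m i : Nat) (d : PySem.Dict Int Int), nums.length - i ≤ m → i ≤ nums.length →
    (∀ c v : Int, d.get? c = some v → ∃ j : Nat, j < i ∧ i ≤ j + k.toNat ∧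
        nums.getD j 0 = v ∧ PySem.Int.floordiv v (t+1) = c) →
    (∀ c : Int, (∃ j : Nat, j < i ∧ i ≤ j + k.toNat ∧ PySem.Int.floordiv (nums.getD j 0) (t+1) = c) →
        d.contains c = true) →
    (∀ j1 j2 : Nat, j1 < j2 → j2 < i → (j2 : Int) - (j1 : Int) ≤ k →
        ¬ (|nums.getD j1 0 - nums.getD j2 0| ≤ t)) →
    (contain_d_loopA nums k t (t+1) d i = "true" ↔ pvFound nums k t) := by
  intro m
  induction m with
  | zero =>
    intro i d hm hi Hd Hc Hnp
    have hin : ¬ i < nums.length := by omega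
    rw [contain_d_loopA, dif_neg hin]
    constructor
    · intro h; exact absurd h (by decide)
    · rintro ⟨j1, j2, h12, h2n, hkk, htt⟩
      exact absurd htt (Hnp j1 j2 h12 (by omega) hkk)
  | succ m ih =>
    intro i d hm hi Hd Hc Hnp
    by_cases hin : i < nums.length
    case neg =>
      rw [contain_d_loopA, dif_neg hin]
      constructor
      · intro h; exact absurd h (by decide)
      · rintro ⟨j1, j2, h12, h2n, hkk, htt⟩
        exact absurd htt (Hnp j1 j2 h12 (by omega) hkk)
    case pos =>
    rw [contain_d_loopA, dif_pos hin]
    set x := nums.getD i 0 with hx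
    set b := PySem.Int.floordiv x (t+1) with hb
    -- window element at distance ≤ k from i gives a pvFound pair with i
    have pair_found : ∀ j : Nat, j < i → i ≤ j + k.toNat →
        |nums.getD j 0 - x| ≤ t → pvFound nums k t := by
      intro j hji hjk hv
      exact ⟨j, i, hji, hin, by omega, hv⟩
    by_cases hcb : d.contains b = true
    case pos =>
      rw [if_pos hcb]
      simp only [true_iff]
      rw [PySem.Dict.contains_eq_isSome_get?] at hcb
      obtain ⟨v, hv⟩ := Option.isSome_iff_exists.mp hcb
      obtain ⟨j, hji, hjk, hveq, hvb⟩ := Hd b v hv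
      refine pair_found j hji hjk ?_
      rw [hveq, pv_close_iff t v x ht]
      exact Or.inl (by rw [hvb, hb])
    case neg =>
    rw [if_neg hcb]
    have hcb' : d.contains b = false := by
      cases h : d.contains b
      · rfl
      · exact absurd h hcb
    -- the two neighbour checks on d1 = d.insert b x read keys ≠ b, so they read d
    have hc1eq : (d.insert b x).contains (b - 1) = d.contains (b - 1) := by
      rw [PySem.Dict.contains_insert]
      have : ((b - 1 : Int) == b) = false := by simp
      rw [this, Bool.false_or]
    have hc2eq : (d.insert b x).contains (b + 1) = d.contains (b + 1) := by
      rw [PySem.Dict.contains_insert]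
      have : ((b + 1 : Int) == b) = false := by simp
      rw [this, Bool.false_or]
    have hg1eq : (d.insert b x).getD (b - 1) 0 = d.getD (b - 1) 0 := by
      rw [PySem.Dict.getD_insert]; rw [if_neg (by omega)]
    have hg2eq : (d.insert b x).getD (b + 1) 0 = d.getD (b + 1) 0 := by
      rw [PySem.Dict.getD_insert]; rw [if_neg (by omega)]
    by_cases hch1 : ((d.insert b x).contains (b - 1) && decide (x - (d.insert b x).getD (b - 1) 0 ≤ t)) = true
    case pos =>
      rw [if_pos hch1]
      simp only [true_iff]
      rw [Bool.and_eq_true, decide_eq_true_eq, hc1eq, hg1eq] at hch1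
      obtain ⟨hc1, hle1⟩ := hch1
      rw [PySem.Dict.contains_eq_isSome_get?] at hc1
      obtain ⟨v, hv⟩ := Option.isSome_iff_exists.mp hc1
      obtain ⟨j, hji, hjk, hveq, hvb⟩ := Hd (b - 1) v hv
      rw [PySem.Dict.getD_of_get?_eq_some d 0 hv] at hle1
      refine pair_found j hji hjk ?_
      rw [hveq, pv_close_iff t v x ht]
      exact Or.inr (Or.inr ⟨by omega, hle1⟩)
    case neg =>
    rw [if_neg hch1]
    by_cases hch2 : ((d.insert b x).contains (b + 1) && decide ((d.insert b x).getD (b + 1) 0 - x ≤ t)) = true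
    case pos =>
      rw [if_pos hch2]
      simp only [true_iff]
      rw [Bool.and_eq_true, decide_eq_true_eq, hc2eq, hg2eq] at hch2
      obtain ⟨hc2, hle2⟩ := hch2
      rw [PySem.Dict.contains_eq_isSome_get?] at hc2
      obtain ⟨v, hv⟩ := Option.isSome_iff_exists.mp hc2
      obtain ⟨j, hji, hjk, hveq, hvb⟩ := Hd (b + 1) v hv
      rw [PySem.Dict.getD_of_get?_eq_some d 0 hv] at hle2
      refine pair_found j hji hjk ?_
      rw [hveq, pv_close_iff t v x ht]
      exact Or.inr (Or.inl ⟨by omega, hle2⟩)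
    case neg =>
    rw [if_neg hch2]
    -- no pair involving index i either: the three checks cover all close values in the window
    have Hnp' : ∀ j1 j2 : Nat, j1 < j2 → j2 < i + 1 → (j2 : Int) - (j1 : Int) ≤ k →
        ¬ (|nums.getD j1 0 - nums.getD j2 0| ≤ t) := by
      intro j1 j2 h12 h2i hkk habs
      by_cases h2 : j2 < i
      · exact Hnp j1 j2 h12 h2 hkk habs
      · have hj2i : j2 = i := by omega
        rw [hj2i] at hkk habs
        have hw1 : j1 < i := by omega
        have hw2 : i ≤ j1 + k.toNat := by omega
        rw [← hx] at habs
        rw [pv_close_iff t (nums.getD j1 0) x ht] at habs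
        -- in every case some earlier check must have fired
        rcases habs with hsame | ⟨hup, hle⟩ | ⟨hdn, hle⟩
        · have := Hc b ⟨j1, hw1, hw2, by rw [hsame, hb]⟩
          rw [this] at hcb'; exact absurd hcb' (by decide)
        · -- bucket of nums[j1] is b + 1; check 2 did not fire
          have hb1 : PySem.Int.floordiv (nums.getD j1 0) (t+1) = b + 1 := by omega
          have hcont : d.contains (b + 1) = true := Hc (b + 1) ⟨j1, hw1, hw2, hb1⟩
          rw [PySem.Dict.contains_eq_isSome_get?] at hcont
          obtain ⟨v, hv⟩ := Option.isSome_iff_exists.mp hcont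
          obtain ⟨j', hj'i, hj'k, hj'eq, hj'b⟩ := Hd (b + 1) v hv
          have hnot : ¬ (v - x ≤ t) := by
            intro hle'
            apply hch2
            rw [Bool.and_eq_true, decide_eq_true_eq, hc2eq, hg2eq,
                PySem.Dict.getD_of_get?_eq_some d 0 hv]
            exact ⟨by rw [PySem.Dict.contains_eq_isSome_get?, hv]; rfl, hle'⟩
          -- v = nums[j'] is in the same bucket as nums[j1]
          rcases Nat.lt_trichotomy j' j1 with hlt | heq | hgt
          · refine Hnp j' j1 hlt hw1 (by omega) ?_
            rw [hj'eq, pv_close_iff t v (nums.getD j1 0) ht]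
            exact Or.inl (by omega)
          · subst heq; rw [hj'eq] at hle; exact hnot hle
          · refine Hnp j1 j' hgt hj'i (by omega) ?_
            rw [hj'eq, pv_close_iff t (nums.getD j1 0) v ht]
            exact Or.inl (by omega)
        · -- bucket of nums[j1] is b - 1; check 1 did not fire
          have hb1 : PySem.Int.floordiv (nums.getD j1 0) (t+1) = b - 1 := by omega
          have hcont : d.contains (b - 1) = true := Hc (b - 1) ⟨j1, hw1, hw2, hb1⟩
          rw [PySem.Dict.contains_eq_isSome_get?] at hcont
          obtain ⟨v, hv⟩ := Option.isSome_iff_exists.mp hcont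
          obtain ⟨j', hj'i, hj'k, hj'eq, hj'b⟩ := Hd (b - 1) v hv
          have hnot : ¬ (x - v ≤ t) := by
            intro hle'
            apply hch1
            rw [Bool.and_eq_true, decide_eq_true_eq, hc1eq, hg1eq,
                PySem.Dict.getD_of_get?_eq_some d 0 hv]
            exact ⟨by rw [PySem.Dict.contains_eq_isSome_get?, hv]; rfl, hle'⟩
          rcases Nat.lt_trichotomy j' j1 with hlt | heq | hgt
          · refine Hnp j' j1 hlt hw1 (by omega) ?_
            rw [hj'eq, pv_close_iff t v (nums.getD j1 0) ht]
            exact Or.inl (by omega)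
          · subst heq; rw [hj'eq] at hle; exact hnot hle
          · refine Hnp j1 j' hgt hj'i (by omega) ?_
            rw [hj'eq, pv_close_iff t (nums.getD j1 0) v ht]
            exact Or.inl (by omega)
    -- set up the next state and apply the induction hypothesis
    by_cases hik : k ≤ (i : Int)
    case pos =>
      rw [if_pos hik]
      set key := PySem.Int.floordiv (nums.getD (i - k.toNat) 0) (t+1) with hkey
      apply ih (i + 1) _ (by omega) (by omega)
      · -- Hd for the erased dict
        intro c v hcv
        by_cases hck : c = key
        · rw [hck, pv_get?_erase_self] at hcv; exact absurd hcv (by simp)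
        · rw [pv_get?_erase_of_ne _ _ _ hck, PySem.Dict.get?_insert] at hcv
          by_cases hcbq : c = b
          · rw [if_pos hcbq] at hcv
            have hK1 : 1 ≤ k.toNat := by
              by_contra hK0
              have : i - k.toNat = i := by omega
              apply hck; rw [hcbq, hkey, this, ← hx, ← hb]
            obtain ⟨rfl⟩ : v = x := by cases hcv; rfl
            exact ⟨i, by omega, by omega, rfl, by rw [← hb, hcbq]⟩
          · rw [if_neg hcbq] at hcv
            obtain ⟨j, hji, hjk, hveq, hvb⟩ := Hd c v hcv
            refine ⟨j, by omega, ?_, hveq, hvb⟩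
            have hjne : j ≠ i - k.toNat := by
              intro hjeq
              apply hck
              rw [hkey, ← hjeq, hveq, hvb]
            omega
      · -- Hc for the erased dict
        intro c ⟨j, hji, hjk, hbkt⟩
        have hK1 : 1 ≤ k.toNat := by omega
        have hwlo : i - k.toNat < i := by omega
        have hkeymem : d.contains key = true :=
          Hc key ⟨i - k.toNat, hwlo, by omega, rfl⟩
        have hbne : b ≠ key := by
          intro hbeq
          rw [← hbeq] at hkeymem
          rw [hkeymem] at hcb'; exact absurd hcb' (by decide)
        rw [PySem.Dict.contains_eq_isSome_get?]
        by_cases hjeq : j = i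
        · -- the newly inserted element
          subst hjeq
          rw [← hx] at hbkt
          rw [pv_get?_erase_of_ne _ _ _ (by rw [← hbkt, ← hb]; exact hbne),
              ← hbkt, ← hb, PySem.Dict.get?_insert_self]
          rfl
        · have hji' : j < i := by omega
          have hcne : c ≠ key := by
            intro hceq
            -- two distinct window indices with the same bucket contradict Hnp
            have hjne : j ≠ i - k.toNat := by omega
            have hclose : |nums.getD j 0 - nums.getD (i - k.toNat) 0| ≤ t := by
              rw [pv_close_iff _ _ _ ht]
              exact Or.inl (by rw [hbkt, hceq, hkey])
            rcases Nat.lt_trichotomy j (i - k.toNat) with hlt | heq | hgt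
            · exact Hnp j (i - k.toNat) hlt hwlo (by omega) hclose
            · exact hjne heq
            · refine Hnp (i - k.toNat) j hgt hji' (by omega) ?_
              rw [abs_sub_comm]; exact hclose
          rw [pv_get?_erase_of_ne _ _ _ hcne, PySem.Dict.get?_insert]
          have hcmem : d.contains c = true := Hc c ⟨j, hji', by omega, hbkt⟩
          rw [PySem.Dict.contains_eq_isSome_get?] at hcmem
          split
          · rfl
          · exact hcmem
      · exact Hnp'
    case neg =>
      rw [if_neg hik]
      apply ih (i + 1) _ (by omega) (by omega)
      · intro c v hcv
        rw [PySem.Dict.get?_insert] at hcv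
        by_cases hcbq : c = b
        · rw [if_pos hcbq] at hcv
          obtain ⟨rfl⟩ : v = x := by cases hcv; rfl
          exact ⟨i, by omega, by omega, rfl, by rw [← hb, hcbq]⟩
        · rw [if_neg hcbq] at hcv
          obtain ⟨j, hji, hjk, hveq, hvb⟩ := Hd c v hcv
          exact ⟨j, by omega, by omega, hveq, hvb⟩
      · intro c ⟨j, hji, hjk, hbkt⟩
        rw [PySem.Dict.contains_insert]
        by_cases hjeq : j = i
        · subst hjeq
          rw [← hx] at hbkt
          have : (c == b) = true := by simp [hbkt, hb]
          rw [this, Bool.true_or]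
        · have : d.contains c = true := Hc c ⟨j, by omega, by omega, hbkt⟩
          rw [this, Bool.or_true]
      · exact Hnp'

-- the A loop only ever returns "true" or "false"
theorem pv_loopA_out (nums : List Int) (k t s : Int) :
    ∀ (m i : Nat) (d : PySem.Dict Int Int), nums.length - i ≤ m →
    contain_d_loopA nums k t s d i = "true" ∨ contain_d_loopA nums k t s d i = "false" := by
  intro m
  induction m with
  | zero =>
    intro i d hm
    rw [contain_d_loopA, dif_neg (by omega)]
    exact Or.inr rfl
  | succ m ih =>
    intro i d hm
    by_cases hin : i < nums.length
    · rw [contain_d_loopA, dif_pos hin]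
      dsimp only
      split
      · exact Or.inl rfl
      · split
        · exact Or.inl rfl
        · split
          · exact Or.inl rfl
          · exact ih (i + 1) _ (by omega)
    · rw [contain_d_loopA, dif_neg hin]
      exact Or.inr rfl

-- ===== VERDICT (by name: the statement is the Claim_ definition above) =====
theorem contain_d_spec : Claim_equal_contain_d := by
  unfold Claim_equal_contain_d
  intro nums k t _
  unfold Spec_contain_d
  by_cases hg : k < 0 ∨ t < 0
  · rw [contain_d, if_pos hg]
    rw [pv_alt_false]
    rintro ⟨i, j, hij, hjn, hk, ht⟩
    rcases hg with hg | hg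
    · omega
    · have := le_trans (abs_nonneg _) ht
      omega
  · rw [not_or] at hg; rw [not_lt, not_lt] at hg
    obtain ⟨hk, ht⟩ := hg
    have hiff := pv_loopA_iff nums k t hk ht nums.length 0 PySem.Dict.empty (by omega) (by omega)
      (by intro c v hcv; rw [PySem.Dict.get?_empty] at hcv; exact absurd hcv (by simp))
      (by rintro c ⟨j, hj, _⟩; omega)
      (by intro j1 j2 _ h2 _; omega)
    rw [contain_d, if_neg (by omega)]
    by_cases hf : pvFound nums k t
    · rw [pv_alt_true nums k t hf, hiff.mpr hf]
    · rw [pv_alt_false nums k t hf]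
      rcases pv_loopA_out nums k t (t+1) nums.length 0 PySem.Dict.empty (by omega) with h | h
      · exact absurd (hiff.mp h) hf
      · exact h
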